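-- pv_equiv track=rewrite | github.com/Jonggae/Algorithm_Practice | 백준/Silver/2805. 나무 자르기/나무 자르기.py | saw_height
-- ===== SOURCE A (Python) =====
-- def wood_cut(trees, height):# 해당 톱으로 자른 나무 길이의 합
--     wood_h = 0
--     for tree in trees:
--         if tree > height:
--             wood_h += tree-height
--     return wood_h
--
-- def saw_height(trees, m):
--     low, high = 0, max(trees)
--     result = 0
--
--     while low <= high:
--         mid = (low + high) // 2
--         if wood_cut(trees, mid) >= m:
--             result = mid
--             low = mid + 1
--         else:
--             high = mid - 1
--
--     return result
-- ===== SOURCE B (Python) =====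
-- def saw_height(trees, m):
--     ts = sorted(trees, reverse=True)
--     best = ts[0] if (ts[0] >= 0 and m <= 0) else 0
--     s = 0
--     n = len(ts)
--     for i in range(n):
--         t = ts[i]
--         s += t
--         k = i + 1
--         lo = ts[i + 1] if i + 1 < n else 0
--         if lo < 0:
--             lo = 0
--         hi = t - 1
--         if lo <= hi:
--             c = (s - m) // k
--             if lo <= c:
--                 cand = c if c <= hi else hi
--                 if best < cand:
--                     best = cand
--     return best
-- ===== Notes on version B (the rewrite author's own statement) =====
-- stated objective: alternative
-- what changed: Replaces A's binary search over cut heights (rescanning all trees each probe) by sorting the trees in descending order once and, for each prefix of k tallest trees, solving the segment's linear cut equation (sum_k - k*h >= m) directly with one floor division, keeping the best valid height.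
import Mathlib
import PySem

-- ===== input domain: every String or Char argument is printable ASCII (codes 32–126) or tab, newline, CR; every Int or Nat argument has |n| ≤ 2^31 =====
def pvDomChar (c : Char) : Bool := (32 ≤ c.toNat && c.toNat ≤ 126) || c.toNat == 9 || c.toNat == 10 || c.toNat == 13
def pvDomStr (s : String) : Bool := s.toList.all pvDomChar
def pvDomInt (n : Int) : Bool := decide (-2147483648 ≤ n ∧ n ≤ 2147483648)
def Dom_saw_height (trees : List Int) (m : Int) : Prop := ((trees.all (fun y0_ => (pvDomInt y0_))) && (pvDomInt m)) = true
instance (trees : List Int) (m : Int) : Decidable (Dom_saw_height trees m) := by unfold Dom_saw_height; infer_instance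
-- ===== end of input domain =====

-- B replaces A's binary search over the cut height by sort + prefix sums, solving each
-- constant-slope segment by one floor division (alternative algorithm, O(n log n)).


-- ===== PORT A =====
def wood_cut (trees : List Int) (height : Int) : Int :=
  trees.foldl (fun wood_h tree => if tree > height then wood_h + (tree - height) else wood_h) 0

def sawLoop (trees : List Int) (m low high result : Int) : Int :=
  if _h : low ≤ high then
    let mid := PySem.Int.floordiv (low + high) 2
    if wood_cut trees mid ≥ m then sawLoop trees m (mid + 1) high mid
    else sawLoop trees m low (mid - 1) result
  else result
termination_by (high + 1 - low).toNat
decreasing_by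
  · have := PySem.Int.floordiv_two_mid_bounds _h; omega
  · have := PySem.Int.floordiv_two_mid_bounds _h; omega

def saw_height (trees : List Int) (m : Int) : Int :=
  match PySem.List.max? trees (fun x => x) with
  | none => 0          -- Python raises ValueError here; excluded by Pre_
  | some high => sawLoop trees m 0 high 0

-- ===== PORT B =====
def headD0 : List Int → Int
  | [] => 0
  | y :: _ => y

def altLoop (m : Int) : List Int → Int → Int → Int → Int
  | [], _, _, best => best
  | t :: rest, s, k, best =>
    let s' := s + t
    let k' := k + 1
    let lo0 : Int := headD0 rest
    let lo := if lo0 < 0 then 0 else lo0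
    let hi := t - 1
    if lo ≤ hi then
      let c := PySem.Int.floordiv (s' - m) k'
      if lo ≤ c then
        let cand := if c ≤ hi then c else hi
        altLoop m rest s' k' (if best < cand then cand else best)
      else altLoop m rest s' k' best
    else altLoop m rest s' k' best

def saw_height_alt (trees : List Int) (m : Int) : Int :=
  let ts := PySem.List.sorted trees (fun x => x) true
  match ts with
  | [] => 0            -- Python raises IndexError here; excluded by Pre_
  | t0 :: _ =>
    let best := if t0 ≥ 0 ∧ m ≤ 0 then t0 else 0
    altLoop m ts 0 0 best

-- ===== PRECONDITION & SPEC =====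
-- A raises ValueError (max of empty sequence) on []; B raises IndexError there too.
def Pre_saw_height (trees : List Int) (m : Int) : Prop := trees ≠ []
instance (trees : List Int) (m : Int) : Decidable (Pre_saw_height trees m) := by
  unfold Pre_saw_height; infer_instance
def pvWitness_saw_height : List Int × Int := ([4, 42, 40, 26, 46], 20)

def Spec_saw_height (trees : List Int) (m : Int) (out : Int) : Prop := out = saw_height_alt trees m
instance (trees : List Int) (m : Int) (out : Int) : Decidable (Spec_saw_height trees m out) := by unfold Spec_saw_height; infer_instance

-- ===== CLAIM (what is proved, stated in full; the proofs are below) =====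
def Claim_equal_saw_height : Prop := ∀ (trees : List Int) (m : Int), Dom_saw_height trees m → Pre_saw_height trees m → Spec_saw_height trees m (saw_height trees m)

-- ===== LEMMAS AND PROOFS =====

theorem wc_foldl (l : List Int) (h : Int) :
    ∀ a : Int, l.foldl (fun wood_h tree => if tree > h then wood_h + (tree - h) else wood_h) a
      = a + l.foldl (fun wood_h tree => if tree > h then wood_h + (tree - h) else wood_h) 0 := by
  induction l with
  | nil => intro a; simp
  | cons x xs ih =>
    intro a
    simp only [List.foldl_cons]
    rw [ih (if x > h then a + (x - h) else a), ih (if x > h then 0 + (x - h) else 0)]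
    split_ifs <;> ring

theorem wood_cut_cons (x : Int) (l : List Int) (h : Int) :
    wood_cut (x :: l) h = (if h < x then x - h else 0) + wood_cut l h := by
  simp only [wood_cut, List.foldl_cons]
  rw [wc_foldl l h (if x > h then 0 + (x - h) else 0)]
  split_ifs <;> omega

theorem wood_cut_nil (h : Int) : wood_cut [] h = 0 := rfl

theorem wood_cut_append (a b : List Int) (h : Int) :
    wood_cut (a ++ b) h = wood_cut a h + wood_cut b h := by
  induction a with
  | nil => simp [wood_cut_nil]
  | cons x xs ih => rw [List.cons_append, wood_cut_cons, ih, wood_cut_cons]; ring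

theorem wood_cut_all_le {l : List Int} {c : Int} (h : ∀ x ∈ l, x ≤ c) :
    wood_cut l c = 0 := by
  induction l with
  | nil => rfl
  | cons x xs ih =>
    rw [wood_cut_cons, if_neg (by have := h x (by simp); omega), ih (fun y hy => h y (by simp [hy]))]
    omega

theorem wood_cut_all_gt {l : List Int} {c : Int} (h : ∀ x ∈ l, c < x) :
    wood_cut l c = l.sum - l.length * c := by
  induction l with
  | nil => simp [wood_cut_nil]
  | cons x xs ih =>
    rw [wood_cut_cons, if_pos (h x (by simp)), ih (fun y hy => h y (by simp [hy]))]
    simp only [List.sum_cons, List.length_cons]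
    push_cast
    ring

theorem wood_cut_perm {l l' : List Int} (hp : l.Perm l') (c : Int) :
    wood_cut l c = wood_cut l' c := by
  induction hp with
  | nil => rfl
  | cons x _ ih => rw [wood_cut_cons, wood_cut_cons, ih]
  | swap x y l => rw [wood_cut_cons, wood_cut_cons, wood_cut_cons, wood_cut_cons]; ring
  | trans _ _ ih1 ih2 => rw [ih1, ih2]

theorem wood_cut_antitone (l : List Int) {c c' : Int} (hcc : c ≤ c') :
    wood_cut l c' ≤ wood_cut l c := by
  induction l with
  | nil => simp [wood_cut_nil]
  | cons x xs ih =>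
    rw [wood_cut_cons, wood_cut_cons]
    have : (if c' < x then x - c' else 0) ≤ (if c < x then x - c else 0) := by
      split_ifs <;> omega
    omega

-- ===== A-side: the binary-search loop computes Nat.findGreatest =====

theorem sawLoop_final (trees : List Int) (m M lo hi res : Int) (hM : 0 ≤ M)
    (hlo : 0 ≤ lo) (hnle : ¬ lo ≤ hi)
    (Hhigh : ∀ h : Int, hi < h → h ≤ M → ¬ m ≤ wood_cut trees h)
    (Hlow : ∀ h : Int, 0 ≤ h → h < lo → m ≤ wood_cut trees h → h ≤ res)
    (Hres : res = 0 ∨ (m ≤ wood_cut trees res ∧ 0 ≤ res ∧ res ≤ M ∧ res < lo)) :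
    res = ((Nat.findGreatest (fun h => m ≤ wood_cut trees (h : Int)) M.toNat : Nat) : Int) := by
  set F := Nat.findGreatest (fun h => m ≤ wood_cut trees (h : Int)) M.toNat with hF
  have hFle : F ≤ M.toNat := Nat.findGreatest_le M.toNat
  by_cases hF0 : F = 0
  · rcases Hres with h0 | ⟨hPres, hres0, hresM, _⟩
    · omega
    · have hres : res.toNat ≤ F := by
        apply Nat.le_findGreatest (by omega)
        show m ≤ wood_cut trees ((res.toNat : Nat) : Int)
        rwa [Int.toNat_of_nonneg hres0]
      omega
  · have hPF : m ≤ wood_cut trees (F : Int) := Nat.findGreatest_of_ne_zero rfl hF0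
    have hFM : (F : Int) ≤ M := by omega
    have hFhi : (F : Int) ≤ hi := by
      by_contra hc
      exact Hhigh (F : Int) (by omega) hFM hPF
    have hFres : (F : Int) ≤ res := Hlow (F : Int) (by omega) (by omega) hPF
    rcases Hres with h0 | ⟨hPres, hres0, hresM, _⟩
    · omega
    · have hres : res.toNat ≤ F := by
        apply Nat.le_findGreatest (by omega)
        show m ≤ wood_cut trees ((res.toNat : Nat) : Int)
        rwa [Int.toNat_of_nonneg hres0]
      omega

theorem sawLoop_eq (trees : List Int) (m M : Int) (hM : 0 ≤ M) :
    ∀ (n : Nat) (lo hi res : Int), (hi + 1 - lo).toNat ≤ n → 0 ≤ lo → hi ≤ M →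
      (∀ h : Int, hi < h → h ≤ M → ¬ m ≤ wood_cut trees h) →
      (∀ h : Int, 0 ≤ h → h < lo → m ≤ wood_cut trees h → h ≤ res) →
      (res = 0 ∨ (m ≤ wood_cut trees res ∧ 0 ≤ res ∧ res ≤ M ∧ res < lo)) →
      sawLoop trees m lo hi res
        = ((Nat.findGreatest (fun h => m ≤ wood_cut trees (h : Int)) M.toNat : Nat) : Int) := by
  intro n
  induction n with
  | zero =>
    intro lo hi res hfuel hlo hhiM Hhigh Hlow Hres
    have hnle : ¬ lo ≤ hi := by omega
    rw [sawLoop, dif_neg hnle]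
    exact sawLoop_final trees m M lo hi res hM hlo hnle Hhigh Hlow Hres
  | succ n ih =>
    intro lo hi res hfuel hlo hhiM Hhigh Hlow Hres
    by_cases hc : lo ≤ hi
    · rw [sawLoop, dif_pos hc]
      have hmid := PySem.Int.floordiv_two_mid_bounds hc
      set mid := PySem.Int.floordiv (lo + hi) 2 with hmiddef
      by_cases hP : wood_cut trees mid ≥ m
      · rw [if_pos hP]
        apply ih (mid + 1) hi mid (by omega) (by omega) hhiM Hhigh
        · intro h h0 hhlt hPh
          omega
        · right
          exact ⟨hP, by omega, by omega, by omega⟩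
      · rw [if_neg hP]
        apply ih lo (mid - 1) res (by omega) hlo (by omega)
        · intro h hgt hle hPh
          have : wood_cut trees h ≤ wood_cut trees mid := wood_cut_antitone trees (by omega)
          omega
        · exact Hlow
        · rcases Hres with h0 | hr
          · exact Or.inl h0
          · exact Or.inr hr
    · rw [sawLoop, dif_neg hc]
      exact sawLoop_final trees m M lo hi res hM hlo hc Hhigh Hlow Hres

-- ===== B-side lemmas =====

theorem altLoop_ge_best (m : Int) :
    ∀ (l : List Int) (s k best : Int), best ≤ altLoop m l s k best := by
  intro l
  induction l with
  | nil => intro s k best; simp [altLoop]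
  | cons t rest ih =>
    intro s k best
    simp only [altLoop]
    split_ifs <;> refine le_trans ?_ (ih _ _ _) <;> omega

theorem altLoop_all_nonpos (m : Int) :
    ∀ (l : List Int) (s k best : Int), (∀ x ∈ l, x ≤ 0) → altLoop m l s k best = best := by
  intro l
  induction l with
  | nil => intro s k best _; rfl
  | cons t rest ih =>
    intro s k best hall
    have ht : t ≤ 0 := hall t (by simp)
    simp only [altLoop]
    rw [if_neg (by split_ifs <;> omega)]
    exact ih _ _ _ (fun x hx => hall x (by simp [hx]))

theorem altLoop_le (m F : Int) (ts : List Int)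
    (hsort : ts.Pairwise (fun a b => b ≤ a))
    (HF : ∀ c : Int, 0 ≤ c → m ≤ wood_cut ts c → (∃ x ∈ ts, c < x) → c ≤ F) :
    ∀ (l p : List Int) (best : Int), ts = p ++ l → best ≤ F →
      altLoop m l p.sum (p.length : Int) best ≤ F := by
  intro l
  induction l with
  | nil => intro p best _ hbest; simpa [altLoop] using hbest
  | cons t rest ih =>
    intro p best hts hbest
    have hstep : ts = (p ++ [t]) ++ rest := by simp [hts]
    have hsum : (p ++ [t]).sum = p.sum + t := by simp
    have hlen : (((p ++ [t]).length : Nat) : Int) = (p.length : Int) + 1 := by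
      simp [List.length_append]
    have step : ∀ X : Int, X ≤ F → altLoop m rest (p.sum + t) ((p.length : Int) + 1) X ≤ F := by
      intro X hX
      have := ih (p ++ [t]) X hstep hX
      rwa [hsum, hlen] at this
    simp only [altLoop]
    set lo := (if headD0 rest < 0 then 0 else headD0 rest) with hlodef
    set c := PySem.Int.floordiv (p.sum + t - m) ((p.length : Int) + 1) with hcdef
    by_cases h1 : lo ≤ t - 1
    case neg => rw [if_neg h1]; exact step best hbest
    case pos =>
    by_cases h2 : lo ≤ c
    case neg => rw [if_pos h1, if_neg h2]; exact step best hbest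
    case pos =>
    rw [if_pos h1, if_pos h2]
    set cand := (if c ≤ t - 1 then c else t - 1) with hcanddef
    have hlo_nonneg : 0 ≤ lo := by rw [hlodef]; split_ifs <;> omega
    have hcand_lo : lo ≤ cand := by rw [hcanddef]; split_ifs <;> omega
    have hcand0 : 0 ≤ cand := le_trans hlo_nonneg hcand_lo
    have hcand_lt_t : cand < t := by rw [hcanddef]; split_ifs <;> omega
    have hsort' : (p ++ t :: rest).Pairwise (fun a b => b ≤ a) := by rw [← hts]; exact hsort
    have hp_ge_t : ∀ x ∈ p, t ≤ x := by
      intro x hx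
      exact (List.pairwise_append.mp hsort').2.2 x hx t (by simp)
    have hrest_le : ∀ x ∈ rest, x ≤ cand := by
      intro x hx
      have hpw : (t :: rest).Pairwise (fun a b => b ≤ a) :=
        (List.pairwise_append.mp hsort').2.1
      cases rest with
      | nil => simp at hx
      | cons y r' =>
        have hxy : x ≤ y := by
          have hy2 := (List.pairwise_cons.mp hpw).2
          rcases List.mem_cons.mp hx with rfl | hx'
          · exact le_refl x
          · exact (List.pairwise_cons.mp hy2).1 x hx'
        have hylo : y ≤ cand := by
          have hhd : headD0 (y :: r') = y := rfl
          rw [hlodef, hhd] at hcand_lo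
          split_ifs at hcand_lo <;> omega
        omega
    have hPcand : m ≤ wood_cut ts cand := by
      rw [hstep, wood_cut_append]
      have hgt : wood_cut (p ++ [t]) cand = (p ++ [t]).sum - (p ++ [t]).length * cand := by
        apply wood_cut_all_gt
        intro x hx
        rcases List.mem_append.mp hx with hx' | hx'
        · have := hp_ge_t x hx'; omega
        · simp only [List.mem_singleton] at hx'
          omega
      have hle0 : wood_cut rest cand = 0 := wood_cut_all_le hrest_le
      have hkpos : (0 : Int) < (p.length : Int) + 1 := by positivity
      have hck : c * ((p.length : Int) + 1) ≤ p.sum + t - m :=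
        (PySem.Int.le_floordiv_iff_mul_le hkpos).mp (le_of_eq hcdef)
      have hcandc : cand ≤ c := by rw [hcanddef]; split_ifs <;> omega
      have hmul : ((p.length : Int) + 1) * cand ≤ ((p.length : Int) + 1) * c :=
        mul_le_mul_of_nonneg_left hcandc (by positivity)
      rw [hgt, hle0, hsum, hlen]
      nlinarith [hck, hmul]
    have hex : ∃ x ∈ ts, cand < x := ⟨t, by rw [hts]; simp, hcand_lt_t⟩
    have hcandF : cand ≤ F := HF cand hcand0 hPcand hex
    refine step _ ?_
    split_ifs <;> omega

theorem altLoop_reaches (m : Int) :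
    ∀ (p : List Int) (t : Int) (r : List Int) (s k best v : Int),
      (if headD0 r < 0 then 0 else headD0 r) ≤ v →
      v ≤ t - 1 →
      v ≤ PySem.Int.floordiv (s + p.sum + t - m) (k + (p.length : Int) + 1) →
      v ≤ altLoop m (p ++ t :: r) s k best := by
  intro p
  induction p with
  | nil =>
    intro t r s k best v hlo hhi hc
    have hc' : v ≤ PySem.Int.floordiv (s + t - m) (k + 1) := by
      have h0 : s + List.sum ([] : List Int) + t - m = s + t - m := by simp
      have h1 : k + ((List.length ([] : List Int) : Nat) : Int) + 1 = k + 1 := by simp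
      rw [h0, h1] at hc
      exact hc
    simp only [List.nil_append, altLoop]
    rw [if_pos (by omega), if_pos (by omega)]
    refine le_trans ?_ (altLoop_ge_best m _ _ _ _)
    split_ifs <;> omega
  | cons x p' ih =>
    intro t r s k best v hlo hhi hc
    have hc' : v ≤ PySem.Int.floordiv (s + x + p'.sum + t - m) (k + 1 + (p'.length : Int) + 1) := by
      have h1 : s + x + p'.sum + t - m = s + (x :: p').sum + t - m := by simp; ring
      have h2 : k + 1 + (p'.length : Int) + 1 = k + ((x :: p').length : Int) + 1 := by
        simp [List.length_cons]
        push_cast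
        ring
      rw [h1, h2]
      exact hc
    simp only [List.cons_append, altLoop]
    split_ifs <;> exact ih t r (s + x) (k + 1) _ v hlo hhi hc'

theorem dropWhile_le_of_pairwise (v : Int) (l : List Int)
    (hp : l.Pairwise (fun a b => b ≤ a)) :
    ∀ x ∈ l.dropWhile (fun a => decide (v < a)), x ≤ v := by
  induction l with
  | nil => simp
  | cons y ys ih =>
    intro x hx
    rw [List.dropWhile_cons] at hx
    split_ifs at hx with h
    · exact ih (List.pairwise_cons.mp hp).2 x hx
    · simp only [decide_eq_true_eq] at h
      rcases List.mem_cons.mp hx with rfl | hx'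
      · omega
      · have := (List.pairwise_cons.mp hp).1 x hx'
        omega

theorem headD0_le_of (l : List Int) (v : Int) (h0 : 0 ≤ v) (hall : ∀ x ∈ l, x ≤ v) :
    (if headD0 l < 0 then 0 else headD0 l) ≤ v := by
  cases l with
  | nil => simpa [headD0] using h0
  | cons y r =>
    have := hall y (by simp)
    simp only [headD0]
    split_ifs <;> omega

theorem saw_height_main (trees : List Int) (m : Int) (hpre : trees ≠ []) :
    saw_height trees m = saw_height_alt trees m := by
  rcases hmax : PySem.List.max? trees (fun x => x) with _ | M
  · exact absurd ((PySem.List.max?_eq_none_iff trees (fun x => x)).mp hmax) hpre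
  rcases hts : PySem.List.sorted trees (fun x => x) true with _ | ⟨t0, tail⟩
  · exact absurd ((PySem.List.sorted_eq_nil_iff trees (fun x => x) true).mp hts) hpre
  have hperm : (t0 :: tail).Perm trees := by
    rw [← hts]; exact PySem.List.sorted_perm trees (fun x => x) true
  have hpair0 : (t0 :: tail).Pairwise (fun a b => b ≤ a) := by
    have h := PySem.List.sorted_pairwise_rev trees (fun x => x)
    rw [hts] at h
    exact h
  have hMmem : M ∈ trees := PySem.List.max?_mem hmax
  have hMmax : ∀ y ∈ trees, y ≤ M := fun y hy => PySem.List.max?_isMax hmax y hy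
  have ht0M : t0 = M := by
    have h1 : t0 ≤ M := hMmax t0 (hperm.mem_iff.mp (by simp))
    have h2 : M ≤ t0 := PySem.List.key_head_sorted_rev_ge trees (fun x => x) hts M hMmem
    omega
  have hcutp : ∀ c : Int, wood_cut trees c = wood_cut (t0 :: tail) c :=
    fun c => (wood_cut_perm hperm c).symm
  have htail_le : ∀ x ∈ (t0 :: tail), x ≤ t0 := by
    intro x hx
    rcases List.mem_cons.mp hx with rfl | hx'
    · exact le_refl x
    · exact (List.pairwise_cons.mp hpair0).1 x hx'
  simp only [saw_height, saw_height_alt, hmax, hts]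
  by_cases hMneg : M < 0
  · rw [sawLoop, dif_neg (by omega)]
    rw [if_neg (by omega : ¬(t0 ≥ 0 ∧ m ≤ 0))]
    rw [altLoop_all_nonpos m _ _ _ _ (fun x hx => by have := htail_le x hx; omega)]
  · push_neg at hMneg
    have hA : sawLoop trees m 0 M 0
        = ((Nat.findGreatest (fun h => m ≤ wood_cut trees (h : Int)) M.toNat : Nat) : Int) := by
      apply sawLoop_eq trees m M hMneg ((M + 1 - 0).toNat) 0 M 0 (by omega) (by omega) (le_refl M)
      · intro h h1 h2
        omega
      · intro h h1 h2 _
        omega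
      · exact Or.inl rfl
    rw [hA]
    set F := Nat.findGreatest (fun h => m ≤ wood_cut trees (h : Int)) M.toNat with hFdef
    set best := (if t0 ≥ 0 ∧ m ≤ 0 then t0 else 0) with hbestdef
    have hbest0 : 0 ≤ best := by rw [hbestdef]; split_ifs with h; exacts [h.1, le_refl 0]
    have hcut0 : wood_cut trees M = 0 := by
      rw [hcutp]
      exact wood_cut_all_le (by intro x hx; have := htail_le x hx; omega)
    have hFM : F ≤ M.toNat := Nat.findGreatest_le M.toNat
    apply le_antisymm
    · -- ↑F ≤ altLoop …
      by_cases hex : ∃ hN : Nat, hN ≤ M.toNat ∧ m ≤ wood_cut trees (hN : Int)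
      · obtain ⟨h0, hh0le, hh0P⟩ := hex
        have hPF : m ≤ wood_cut trees (F : Int) := by
          have h := Nat.findGreatest_spec (P := fun h => m ≤ wood_cut trees (h : Int)) hh0le hh0P
          rw [← hFdef] at h
          exact h
        by_cases hm0 : m ≤ 0
        · have hMF : M.toNat ≤ F := by
            apply Nat.le_findGreatest (le_refl _)
            show m ≤ wood_cut trees ((M.toNat : Nat) : Int)
            rw [Int.toNat_of_nonneg hMneg, hcut0]
            exact hm0
          have hbt : best = t0 := by rw [hbestdef, if_pos ⟨by omega, hm0⟩]
          have hFMeq : (F : Int) = t0 := by omega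
          rw [hFMeq, ← hbt]
          exact altLoop_ge_best m _ _ _ _
        · push_neg at hm0
          have hex2 : ∃ x ∈ (t0 :: tail), (F : Int) < x := by
            by_contra hall
            push_neg at hall
            have h0' : wood_cut trees (F : Int) = 0 := by
              rw [hcutp]; exact wood_cut_all_le hall
            omega
          set pre := (t0 :: tail).takeWhile (fun a => decide ((F : Int) < a)) with hpredef
          set suf := (t0 :: tail).dropWhile (fun a => decide ((F : Int) < a)) with hsufdef
          have hsplit : pre ++ suf = t0 :: tail := List.takeWhile_append_dropWhile
          have hpre_gt : ∀ x ∈ pre, (F : Int) < x := by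
            intro x hx
            have h := List.mem_takeWhile_imp hx
            simpa using h
          have hpre_ne : pre ≠ [] := by
            obtain ⟨x, hxmem, hxgt⟩ := hex2
            have ht0gt : (F : Int) < t0 := lt_of_lt_of_le hxgt (htail_le x hxmem)
            rw [hpredef, List.takeWhile_cons_of_pos (by simpa using ht0gt)]
            simp
          have hsuf_le : ∀ x ∈ suf, x ≤ (F : Int) := by
            rw [hsufdef]
            exact dropWhile_le_of_pairwise (F : Int) (t0 :: tail) hpair0
          have hcutF : m ≤ pre.sum - (pre.length : Int) * (F : Int) := by
            have h1 : wood_cut trees ((F : Nat) : Int) = wood_cut pre (F : Int) + wood_cut suf (F : Int) := by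
              rw [hcutp, ← hsplit, wood_cut_append]
            rw [wood_cut_all_gt hpre_gt, wood_cut_all_le hsuf_le] at h1
            linarith [hPF, h1]
          obtain ⟨q, tl, hq⟩ : ∃ q tl, pre = q ++ [tl] :=
            ⟨pre.dropLast, pre.getLast hpre_ne, (List.dropLast_append_getLast hpre_ne).symm⟩
          have htl_gt : (F : Int) < tl := hpre_gt tl (by rw [hq]; simp)
          have hlist : t0 :: tail = q ++ tl :: suf := by rw [← hsplit, hq]; simp
          rw [hlist]
          apply altLoop_reaches m q tl suf 0 0 best (F : Int)
          · exact headD0_le_of suf (F : Int) (by positivity) hsuf_le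
          · omega
          · have hsum2 : q.sum + tl = pre.sum := by rw [hq]; simp
            have hlen2 : (q.length : Int) + 1 = (pre.length : Int) := by
              have : pre.length = q.length + 1 := by rw [hq]; simp
              omega
            have hkpos : (0 : Int) < (q.length : Int) + 1 := by positivity
            rw [show (0 : Int) + q.sum + tl - m = q.sum + tl - m by ring,
                show (0 : Int) + (q.length : Int) + 1 = (q.length : Int) + 1 by ring]
            rw [PySem.Int.le_floordiv_iff_mul_le hkpos]
            have hmc := mul_comm ((F : Nat) : Int) ((pre.length : Nat) : Int)
            have hrw : q.sum + tl = pre.sum := hsum2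
            nlinarith [hcutF, hlen2, hsum2]
      · push_neg at hex
        have hF0 : F = 0 := by
          by_contra hne
          have hPF : m ≤ wood_cut trees (F : Int) := by
            have h := Nat.findGreatest_of_ne_zero (P := fun h => m ≤ wood_cut trees (h : Int))
              hFdef.symm hne
            exact h
          have := hex F hFM
          omega
        rw [hF0]
        exact le_trans (by omega) (le_trans hbest0 (altLoop_ge_best m _ _ _ _))
    · -- altLoop … ≤ ↑F
      have hHF : ∀ c : Int, 0 ≤ c → m ≤ wood_cut (t0 :: tail) c →
          (∃ x ∈ (t0 :: tail), c < x) → c ≤ (F : Int) := by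
        intro cc hcc0 hccP hccex
        obtain ⟨x, hxmem, hxlt⟩ := hccex
        have hccM : cc < M := by
          have := htail_le x hxmem
          omega
        have hPn : m ≤ wood_cut trees ((cc.toNat : Nat) : Int) := by
          rw [Int.toNat_of_nonneg hcc0, hcutp]
          exact hccP
        have h := Nat.le_findGreatest (P := fun h => m ≤ wood_cut trees (h : Int))
          (show cc.toNat ≤ M.toNat by omega) hPn
        rw [← hFdef] at h
        omega
      have hbF : best ≤ (F : Int) := by
        rw [hbestdef]
        split_ifs with hb
        · have hPM : m ≤ wood_cut trees ((M.toNat : Nat) : Int) := by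
            rw [Int.toNat_of_nonneg hMneg, hcut0]; exact hb.2
          have h := Nat.le_findGreatest (P := fun h => m ≤ wood_cut trees (h : Int))
            (le_refl M.toNat) hPM
          rw [← hFdef] at h
          omega
        · positivity
      have h := altLoop_le m (F : Int) (t0 :: tail) hpair0 hHF (t0 :: tail) [] best rfl hbF
      simpa using h

-- ===== VERDICT (by name: the statement is the Claim_ definition above) =====
theorem saw_height_spec : Claim_equal_saw_height := by
  unfold Claim_equal_saw_height
  intro trees m _dom hpre
  unfold Spec_saw_height
  exact saw_height_main trees m hpre
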